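-- pv_equiv track=rewrite | github.com/hcisbmm/lerobot | src/lerobot/utils/visualization_utils.py | parse_effort_key
-- ===== SOURCE A (Python) =====
-- def parse_effort_key(key: str) -> tuple[str, str] | None:
--     """Parse a bi_yam effort/position key into (arm_side, part_name).
--
--     Returns ('left', 'joint_0') for 'left_joint_0.eff', ('right', 'gripper')
--     for 'right_gripper.eff', and None for anything that doesn't fit the pattern.
--     Works for both '.eff' and '.pos' suffixes.
--     """
--     if "." not in key:
--         return None
--     base, _, _ = key.rpartition(".")
--     for arm in ("left", "right"):
--         prefix = f"{arm}_"
--         if base.startswith(prefix):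
--             part = base[len(prefix):]
--             if part == "gripper":
--                 return arm, part
--             if part.startswith("joint_") and part[len("joint_"):].isdigit():
--                 return arm, part
--     return None
-- ===== SOURCE B (Python) =====
-- def parse_effort_key(key: str) -> tuple[str, str] | None:
--     """Split-based re-implementation: tokenize the base on '_' and match the
--     token shape instead of scanning arm prefixes."""
--     if "." not in key:
--         return None
--     base = key.rpartition(".")[0]
--     parts = base.split("_")
--     arm = parts[0]
--     if arm not in ("left", "right"):
--         return None
--     rest = parts[1:]
--     if rest == ["gripper"]:
--         return arm, "gripper"
--     if len(rest) == 2 and rest[0] == "joint" and rest[1].isdigit():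
--         return arm, "joint_" + rest[1]
--     return None
-- ===== Notes on version B (the rewrite author's own statement) =====
-- stated objective: alternative
-- what changed: B replaces A's loop over arm prefixes with startswith/slicing by a single underscore-tokenization of the base followed by a shape match on the token list (head in {left, right}, tail equal to [gripper] or [joint, digits]).
import Mathlib
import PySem

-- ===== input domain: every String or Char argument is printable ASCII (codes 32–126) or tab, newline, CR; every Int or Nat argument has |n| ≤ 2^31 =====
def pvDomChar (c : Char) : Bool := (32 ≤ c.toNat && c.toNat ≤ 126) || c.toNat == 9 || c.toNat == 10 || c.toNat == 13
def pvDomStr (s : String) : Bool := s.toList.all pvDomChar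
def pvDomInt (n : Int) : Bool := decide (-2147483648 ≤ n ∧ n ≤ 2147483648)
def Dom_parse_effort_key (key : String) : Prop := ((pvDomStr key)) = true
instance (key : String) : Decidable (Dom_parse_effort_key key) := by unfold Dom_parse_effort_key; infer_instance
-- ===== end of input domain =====

-- B replaces A's arm-prefix loop by tokenizing the base on '_' and matching the token shape (objective: alternative, same cost).


-- ===== PORT A =====
-- hand port of the builtin str.rpartition(".")[0] for the one-char separator '.':
-- the text before the LAST '.' ("" when there is no '.') — exact (used by both ports, as both Pythons call rpartition)
def rpartitionBefore (cs : List Char) : List Char :=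
  (((cs.reverse).dropWhile (· ≠ '.')).drop 1).reverse

-- the 'for arm in ("left", "right")' loop of A, step for step
def pvArmLoopA (base : List Char) : List String → Option (String × String)
  | [] => none
  | arm :: arms =>
    let pre := arm.toList ++ ['_']                  -- f"{arm}_"
    if PySem.Chars.startswith base pre then
      let part := PySem.List.slice base (some (pre.length : Int)) none   -- base[len(prefix):]
      if part = "gripper".toList then some (arm, String.ofList part)
      else if PySem.Chars.startswith part "joint_".toList
              && PySem.Chars.strIsdigit (PySem.List.slice part (some 6) none) then
        some (arm, String.ofList part)
      else pvArmLoopA base arms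
    else pvArmLoopA base arms

def parse_effort_key (key : String) : Option (String × String) :=
  if !PySem.Str.isIn "." key then none              -- if "." not in key: return None
  else pvArmLoopA (rpartitionBefore key.toList) ["left", "right"]

-- ===== PORT B =====
-- B's logic after base.split("_"): parts[0] membership test, then shape match on parts[1:]
def pvTailB (arm : List Char) (rest : List (List Char)) : Option (String × String) :=
  if rest = ["gripper".toList] then some (String.ofList arm, "gripper")
  else
    match rest with                                  -- len(rest)==2 and rest[0]=="joint" and rest[1].isdigit()
    | [r0, r1] =>
      if r0 = "joint".toList && PySem.Chars.strIsdigit r1 then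
        some (String.ofList arm, String.ofList ("joint_".toList ++ r1))   -- "joint_" + rest[1]
      else none
    | _ => none

def parse_effort_key_alt (key : String) : Option (String × String) :=
  if !PySem.Str.isIn "." key then none
  else
    let base := rpartitionBefore key.toList
    let parts := PySem.Chars.splitOn base "_".toList   -- base.split("_"); never empty, so parts[0] is safe
    let arm := parts.headD []
    if !(arm = "left".toList || arm = "right".toList) then none
    else pvTailB arm (parts.drop 1)

-- ===== PRECONDITION & SPEC =====
def Spec_parse_effort_key (key : String) (out : Option (String × String)) : Prop := out = parse_effort_key_alt key
instance (key : String) (out : Option (String × String)) : Decidable (Spec_parse_effort_key key out) := by unfold Spec_parse_effort_key; infer_instance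

-- ===== CLAIM (what is proved, stated in full; the proofs are below) =====
def Claim_equal_parse_effort_key : Prop := ∀ (key : String), Dom_parse_effort_key key → Spec_parse_effort_key key (parse_effort_key key)

-- ===== LEMMAS AND PROOFS =====

-- a plain structural model of base.split("_"), to reason about PySem's fuel-based splitOn
def sspl : List Char → List (List Char)
  | [] => [[]]
  | c :: rest =>
    if c = '_' then [] :: sspl rest
    else match sspl rest with
         | [] => [[c]]
         | p :: ps => (c :: p) :: ps

theorem sspl_ne_nil (cs : List Char) : sspl cs ≠ [] := by
  cases cs with
  | nil => simp [sspl]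
  | cons c rest =>
    simp only [sspl]
    split_ifs
    · simp
    · cases h : sspl rest <;> simp

theorem splitOn_go_eq (fuel : Nat) : ∀ (l cur : List Char) (accs : List (List Char)),
    l.length < fuel →
    PySem.Chars.splitOn.go ['_'] fuel l cur accs =
      accs.reverse ++ (match sspl l with
        | [] => [cur.reverse]
        | p :: ps => (cur.reverse ++ p) :: ps) := by
  induction fuel with
  | zero => intro l cur accs h; omega
  | succ fuel ih =>
    intro l cur accs h
    cases l with
    | nil => simp [PySem.Chars.splitOn.go, sspl]
    | cons c rest =>
      by_cases hc : c = '_'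
      · subst hc
        have : PySem.Chars.splitOn.go ['_'] (fuel + 1) ('_' :: rest) cur accs =
            PySem.Chars.splitOn.go ['_'] fuel rest [] (cur.reverse :: accs) := by
          simp [PySem.Chars.splitOn.go, List.isPrefixOf]
        rw [this, ih rest [] (cur.reverse :: accs) (by simpa using h)]
        have hne := sspl_ne_nil rest
        cases hs : sspl rest with
        | nil => exact absurd hs hne
        | cons p ps => simp [sspl, hs]
      · have : PySem.Chars.splitOn.go ['_'] (fuel + 1) (c :: rest) cur accs =
            PySem.Chars.splitOn.go ['_'] fuel rest (c :: cur) accs := by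
          have hc' : ¬('_' = c) := fun h => hc h.symm
          simp [PySem.Chars.splitOn.go, List.isPrefixOf, hc']
        rw [this, ih rest (c :: cur) accs (by simpa using h)]
        have hne := sspl_ne_nil rest
        cases hs : sspl rest with
        | nil => exact absurd hs hne
        | cons p ps => simp [sspl, hs, hc]

theorem splitOn_eq_sspl (cs : List Char) : PySem.Chars.splitOn cs "_".toList = sspl cs := by
  show PySem.Chars.splitOn cs ['_'] = sspl cs
  unfold PySem.Chars.splitOn
  rw [splitOn_go_eq (cs.length + 1) cs [] [] (by omega)]
  have hne := sspl_ne_nil cs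
  cases hs : sspl cs with
  | nil => exact absurd hs hne
  | cons p ps => simp

theorem sspl_no_sep (cs : List Char) (h : '_' ∉ cs) : sspl cs = [cs] := by
  induction cs with
  | nil => simp [sspl]
  | cons c rest ih =>
    have hc : c ≠ '_' := fun hc => h (hc ▸ List.mem_cons_self)
    have hr : '_' ∉ rest := fun hm => h (List.mem_cons_of_mem _ hm)
    simp [sspl, hc, ih hr]

theorem sspl_sep_append (x y : List Char) (h : '_' ∉ x) :
    sspl (x ++ '_' :: y) = x :: sspl y := by
  induction x with
  | nil => simp [sspl]
  | cons c rest ih =>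
    have hc : c ≠ '_' := fun hc => h (hc ▸ List.mem_cons_self)
    have hr : '_' ∉ rest := fun hm => h (List.mem_cons_of_mem _ hm)
    simp [sspl, hc, ih hr]

theorem intercalate_cons_head (c : Char) (p : List Char) (ps : List (List Char)) :
    List.intercalate ['_'] ((c :: p) :: ps) = c :: List.intercalate ['_'] (p :: ps) := by
  cases ps <;> simp [List.intercalate]

theorem sspl_intercalate (cs : List Char) : List.intercalate ['_'] (sspl cs) = cs := by
  induction cs with
  | nil => simp [sspl, List.intercalate]
  | cons c rest ih =>
    by_cases hc : c = '_'
    · subst hc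
      have hne := sspl_ne_nil rest
      cases hs : sspl rest with
      | nil => exact absurd hs hne
      | cons p ps =>
        rw [hs] at ih
        simp only [sspl, hs, reduceIte]
        rw [show List.intercalate ['_'] ([] :: p :: ps) = '_' :: List.intercalate ['_'] (p :: ps) from by
          simp [List.intercalate], ih]
    · have hne := sspl_ne_nil rest
      cases hs : sspl rest with
      | nil => exact absurd hs hne
      | cons p ps =>
        rw [hs] at ih
        simp only [sspl, if_neg hc, hs]
        rw [intercalate_cons_head, ih]

-- B's token-shape check returns none when part is neither "gripper" nor "joint_<digits>"
theorem tailB_none (arm part : List Char) (hg : part ≠ "gripper".toList)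
    (hnj : ∀ d, part = "joint".toList ++ '_' :: d → PySem.Chars.strIsdigit d ≠ true) :
    pvTailB arm (sspl part) = none := by
  have hne := sspl_ne_nil part
  cases hs : sspl part with
  | nil => exact absurd hs hne
  | cons p ps =>
    have hint := sspl_intercalate part
    rw [hs] at hint
    cases ps with
    | nil =>
      have hp : part = p := by simpa [List.intercalate] using hint.symm
      simp only [pvTailB]
      rw [if_neg (by intro h; injection h with h1 _; exact hg (hp.trans h1))]
    | cons q qs =>
      cases qs with
      | nil =>
        have hpq : part = p ++ '_' :: q := by simpa [List.intercalate] using hint.symm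
        simp only [pvTailB]
        rw [if_neg (by simp), if_neg]
        simp only [Bool.and_eq_true, decide_eq_true_eq]
        rintro ⟨h1, h2⟩
        exact hnj q (by rw [hpq, h1]) h2
      | cons r rs => simp [pvTailB]

-- the core fact: A's per-arm tail check equals B's token-shape check on sspl part
theorem tail_eq (arm : String) (part : List Char) :
    (if part = "gripper".toList then some (arm, String.ofList part)
     else if PySem.Chars.startswith part "joint_".toList
             && PySem.Chars.strIsdigit (PySem.List.slice part (some 6) none) then
       some (arm, String.ofList part)
     else none)
    = pvTailB arm.toList (sspl part) := by
  by_cases hg : part = "gripper".toList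
  · subst hg
    rw [sspl_no_sep "gripper".toList (by decide)]
    simp [pvTailB]
  · by_cases hj : PySem.Chars.startswith part "joint_".toList = true
    · obtain ⟨d, hd⟩ := (PySem.Chars.startswith_iff part "joint_".toList).mp hj
      have hdrop : PySem.List.slice part (some 6) none = d := by
        rw [PySem.List.slice_from part (by norm_num), ← hd]
        simp
      by_cases hdig : PySem.Chars.strIsdigit d = true
      · have hdu : '_' ∉ d := by
          intro hm
          have h2 : ∀ x ∈ d, PySem.Chars.isdigit x = true := by
            have h3 := hdig
            simp [PySem.Chars.strIsdigit] at h3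
            exact h3.2
          exact absurd (h2 _ hm) (by decide)
        have hsp : sspl part = ["joint".toList, d] := by
          rw [← hd]
          have h5 : "joint_".toList ++ d = "joint".toList ++ '_' :: d := by rfl
          rw [h5, sspl_sep_append _ _ (by decide), sspl_no_sep d hdu]
        have hcond : (PySem.Chars.startswith part "joint_".toList
            && PySem.Chars.strIsdigit d) = true := by
          rw [Bool.and_eq_true]; exact ⟨hj, hdig⟩
        rw [hdrop, if_neg hg, if_pos hcond, hsp]
        simp only [pvTailB]
        rw [if_neg (by simp), if_pos (by simp [hdig])]
        rw [String.ofList_toList, ← hd]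
      · rw [hdrop, if_neg hg,
          if_neg (fun hc => hdig ((Bool.and_eq_true _ _).mp hc).2)]
        refine (tailB_none arm.toList part hg ?_).symm
        intro e he hq
        apply hdig
        have : d = e := by
          have h2 := hd.trans he
          simpa using h2
        rw [this]; exact hq
    · rw [if_neg hg, if_neg (fun hc => hj ((Bool.and_eq_true _ _).mp hc).1)]
      refine (tailB_none arm.toList part hg ?_).symm
      intro e he _
      exact hj (by
        rw [PySem.Chars.startswith_iff]
        exact ⟨e, by rw [he]; rfl⟩)

theorem core_eq (base : List Char) :
    pvArmLoopA base ["left", "right"] =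
      (let parts := sspl base
       let arm := parts.headD []
       if !(arm = "left".toList || arm = "right".toList) then none
       else pvTailB arm (parts.drop 1)) := by
  by_cases hL : PySem.Chars.startswith base "left_".toList = true
  · obtain ⟨part, hp⟩ := (PySem.Chars.startswith_iff base "left_".toList).mp hL
    have hbase : base = "left".toList ++ '_' :: part := by rw [← hp]; simp
    have hsp : sspl base = "left".toList :: sspl part := by
      rw [hbase, sspl_sep_append _ _ (by decide)]
    have hR2 : PySem.Chars.startswith base ("right".toList ++ ['_']) = false := by
      rw [Bool.eq_false_iff]
      intro hc
      obtain ⟨t, ht⟩ := (PySem.Chars.startswith_iff base _).mp hc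
      rw [hbase] at ht
      exact absurd (congrArg (·.headD ' ') ht) (by simp)
    have hpart : PySem.List.slice base (some (("left".toList ++ ['_']).length : Int)) none = part := by
      rw [show (("left".toList ++ ['_']).length : Int) = 5 from rfl,
        PySem.List.slice_from base (by norm_num), hbase]
      rfl
    simp only [pvArmLoopA]
    rw [if_pos (by simpa using hL), hpart, hR2]
    simp only [Bool.false_eq_true, reduceIte]
    rw [tail_eq "left" part]
    simp only [hsp]
    simp
  · by_cases hR : PySem.Chars.startswith base "right_".toList = true
    · obtain ⟨part, hp⟩ := (PySem.Chars.startswith_iff base "right_".toList).mp hR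
      have hbase : base = "right".toList ++ '_' :: part := by rw [← hp]; simp
      have hsp : sspl base = "right".toList :: sspl part := by
        rw [hbase, sspl_sep_append _ _ (by decide)]
      have hpart : PySem.List.slice base (some (("right".toList ++ ['_']).length : Int)) none = part := by
        rw [show (("right".toList ++ ['_']).length : Int) = 6 from rfl,
          PySem.List.slice_from base (by norm_num), hbase]
        rfl
      simp only [pvArmLoopA]
      rw [if_neg (by simpa using hL), if_pos (by simpa using hR), hpart, tail_eq "right" part]
      simp only [hsp]
      simp
    · -- A returns none; B's arm can be "left"/"right" only with an empty rest
      simp only [pvArmLoopA]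
      rw [if_neg (by simpa using hL), if_neg (by simpa using hR)]
      have hne := sspl_ne_nil base
      cases hs : sspl base with
      | nil => exact absurd hs hne
      | cons p ps =>
        simp only [List.headD, List.drop]
        by_cases harm : p = "left".toList ∨ p = "right".toList
        · rw [if_neg (by rcases harm with h | h <;> simp [h])]
          cases ps with
          | nil => simp [pvTailB]
          | cons q qs =>
            exfalso
            have hbase : base = p ++ '_' :: List.intercalate ['_'] (q :: qs) := by
              have := sspl_intercalate base; rw [hs] at this
              simpa [List.intercalate] using this.symm
            rcases harm with h | h
            · apply absurd _ (Bool.eq_false_iff.mp (Bool.eq_false_iff.mpr hL))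
              rw [PySem.Chars.startswith_iff]
              exact ⟨List.intercalate ['_'] (q :: qs), by rw [hbase, h]; simp⟩
            · apply absurd _ (Bool.eq_false_iff.mp (Bool.eq_false_iff.mpr hR))
              rw [PySem.Chars.startswith_iff]
              exact ⟨List.intercalate ['_'] (q :: qs), by rw [hbase, h]; simp⟩
        · rw [if_pos]
          have h1 : p ≠ ['l', 'e', 'f', 't'] := fun h => harm (Or.inl h)
          have h2 : p ≠ ['r', 'i', 'g', 'h', 't'] := fun h => harm (Or.inr h)
          simp [h1, h2]

-- ===== VERDICT (by name: the statement is the Claim_ definition above) =====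
theorem parse_effort_key_spec : Claim_equal_parse_effort_key := by
  intro key _
  unfold Spec_parse_effort_key parse_effort_key parse_effort_key_alt
  by_cases hdot : PySem.Str.isIn "." key = true
  · simp only [hdot, Bool.not_true, Bool.false_eq_true, if_false]
    rw [splitOn_eq_sspl]
    exact core_eq (rpartitionBefore key.toList)
  · have h' : PySem.Chars.isIn ['.'] key.toList = false := by
      simpa using Bool.eq_false_iff.mpr hdot
    simp [h']
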